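-- pv_equiv track=rewrite | github.com/shuumaiko/SIEM-Detection-as-Code | project-root/app/services/rule_deployment_builder.py | _normalize_query_whitespace
-- ===== SOURCE A (Python) =====
-- def _normalize_query_whitespace(query: str) -> str:
--     """Collapse redundant blank lines and trailing spaces in rendered queries.
--
--     Parameters:
--         query: Query string after ingest placeholder substitution.
--
--     Returns:
--         The cleaned query with line content preserved, trailing whitespace
--         removed, and multiple empty lines collapsed to a single line break.
--     """
--     normalized_lines = [line.rstrip() for line in query.replace("\r\n", "\n").split("\n")]
--     cleaned_lines: list[str] = []
--     previous_blank = False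
--
--     # Preserve the query's multiline structure while removing the extra
--     # empty lines introduced by placeholder replacement and YAML source layout.
--     for line in normalized_lines:
--         is_blank = line == ""
--         if is_blank and previous_blank:
--             continue
--         cleaned_lines.append(line)
--         previous_blank = is_blank
--
--     return "\n".join(cleaned_lines).strip()
-- ===== SOURCE B (Python) =====
-- def _normalize_query_whitespace(query: str) -> str:
--     """Paragraph-reconstruction rewrite: gather runs of non-blank lines into
--     blocks, then join blocks with a single blank line; the final strip makes
--     leading/trailing blank runs irrelevant."""
--     lines = [line.rstrip() for line in query.replace("\r\n", "\n").split("\n")]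
--     blocks = []
--     current = []
--     for line in lines:
--         if line == "":
--             if current:
--                 blocks.append(current)
--                 current = []
--         else:
--             current.append(line)
--     if current:
--         blocks.append(current)
--     return "\n\n".join("\n".join(block) for block in blocks).strip()
-- ===== Notes on version B (the rewrite author's own statement) =====
-- stated objective: alternative
-- what changed: B drops A's previous_blank flag loop and instead gathers runs of consecutive non-blank lines into blocks, joining the lines within a block with single newlines and separating blocks by one blank line before the final strip.
import Mathlib
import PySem

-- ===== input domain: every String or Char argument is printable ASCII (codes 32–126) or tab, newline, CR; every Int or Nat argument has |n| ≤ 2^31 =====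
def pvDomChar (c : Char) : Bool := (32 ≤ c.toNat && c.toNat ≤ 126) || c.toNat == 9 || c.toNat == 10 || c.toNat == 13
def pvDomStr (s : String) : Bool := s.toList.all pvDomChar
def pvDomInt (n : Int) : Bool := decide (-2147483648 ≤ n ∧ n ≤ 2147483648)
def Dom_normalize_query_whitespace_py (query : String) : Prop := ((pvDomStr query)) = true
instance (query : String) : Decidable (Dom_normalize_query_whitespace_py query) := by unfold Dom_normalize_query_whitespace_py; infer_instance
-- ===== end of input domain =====

-- B rebuilds the query as blocks of consecutive non-blank lines joined by single blank lines,
-- replacing A's previous_blank flag loop (objective: alternative decomposition, same cost).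


-- ===== PORT A =====
-- loop body of A: state = (cleaned_lines, previous_blank)
def pvStepA (st : List (List Char) × Bool) (line : List Char) : List (List Char) × Bool :=
  let is_blank := line == []
  if is_blank && st.2 then st else (st.1 ++ [line], is_blank)

def normalize_query_whitespace_py (query : String) : String :=
  let normalized_lines :=
    (PySem.Chars.splitOn (PySem.Chars.replace query.toList ['\r', '\n'] ['\n']) ['\n']).map
      (fun line => PySem.Chars.rstrip line)
  let r := normalized_lines.foldl pvStepA ([], false)
  String.ofList (PySem.Chars.strip (PySem.Chars.join ['\n'] r.1))

-- ===== PORT B =====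
-- loop body of B: state = (blocks, current)
def pvStepB (st : List (List (List Char)) × List (List Char)) (line : List Char) :
    List (List (List Char)) × List (List Char) :=
  if line == [] then (if st.2 == [] then st else (st.1 ++ [st.2], []))
  else (st.1, st.2 ++ [line])

def normalize_query_whitespace_py_alt (query : String) : String :=
  let lines :=
    (PySem.Chars.splitOn (PySem.Chars.replace query.toList ['\r', '\n'] ['\n']) ['\n']).map
      (fun line => PySem.Chars.rstrip line)
  let st := lines.foldl pvStepB ([], [])
  let blocks := if st.2 == [] then st.1 else st.1 ++ [st.2]
  String.ofList (PySem.Chars.strip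
    (PySem.Chars.join ['\n', '\n'] (blocks.map (fun block => PySem.Chars.join ['\n'] block))))

-- ===== PRECONDITION & SPEC =====
def Spec_normalize_query_whitespace_py (query : String) (out : String) : Prop := out = normalize_query_whitespace_py_alt query
instance (query : String) (out : String) : Decidable (Spec_normalize_query_whitespace_py query out) := by unfold Spec_normalize_query_whitespace_py; infer_instance

-- ===== CLAIM (what is proved, stated in full; the proofs are below) =====
def Claim_equal_normalize_query_whitespace_py : Prop := ∀ (query : String), Dom_normalize_query_whitespace_py query → Spec_normalize_query_whitespace_py query (normalize_query_whitespace_py query)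

-- ===== LEMMAS AND PROOFS =====

-- A's loop as structural recursion (p = previous_blank).
def pvClean (p : Bool) : List (List Char) → List (List Char)
  | [] => []
  | l :: ls => if (l == []) && p then pvClean p ls else l :: pvClean (l == []) ls

-- B's loop + final flush as structural recursion (cur = current open block).
def pvBlocks (cur : List (List Char)) : List (List Char) → List (List (List Char))
  | [] => if cur == [] then [] else [cur]
  | l :: ls =>
    if l == [] then (if cur == [] then pvBlocks [] ls else cur :: pvBlocks [] ls)
    else pvBlocks (cur ++ [l]) ls

-- A's output after already-emitted content, each cleaned line prefixed by '\n'.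
def pvTa (p : Bool) : List (List Char) → List Char
  | [] => []
  | l :: ls =>
    if l == [] then (if p then pvTa true ls else '\n' :: pvTa true ls)
    else ['\n'] ++ l ++ pvTa false ls

-- B's output after already-emitted content (opn = a block is open).
def pvTb (opn : Bool) : List (List Char) → List Char
  | [] => []
  | l :: ls =>
    if l == [] then pvTb false ls
    else (if opn then ['\n'] else ['\n', '\n']) ++ l ++ pvTb true ls

theorem pvFoldA (ls : List (List Char)) (acc : List (List Char)) (p : Bool) :
    (ls.foldl pvStepA (acc, p)).1 = acc ++ pvClean p ls := by
  induction ls generalizing acc p with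
  | nil => simp [pvClean]
  | cons l ls ih =>
    cases p <;> by_cases hl : l = [] <;>
      simp [pvClean, pvStepA, hl, ih]

theorem pvFoldB (ls : List (List Char)) (bs : List (List (List Char))) (cur : List (List Char)) :
    (if (ls.foldl pvStepB (bs, cur)).2 == [] then (ls.foldl pvStepB (bs, cur)).1
     else (ls.foldl pvStepB (bs, cur)).1 ++ [(ls.foldl pvStepB (bs, cur)).2]) =
      bs ++ pvBlocks cur ls := by
  induction ls generalizing bs cur with
  | nil => by_cases h : cur = [] <;> simp [pvBlocks, h]
  | cons l ls ih =>
    by_cases hl : l = []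
    · by_cases hc : cur = []
      · have := ih bs []
        simp only [List.foldl_cons, pvStepB, hl, hc]
        simpa [pvBlocks] using this
      · have := ih (bs ++ [cur]) []
        simp only [List.foldl_cons, pvStepB, hl, beq_self_eq_true, if_pos, if_neg (by simpa using hc)]
        simp [pvBlocks, hc] at this ⊢
        simpa using this
    · have := ih bs (cur ++ [l])
      simp only [List.foldl_cons, pvStepB, if_neg (by simpa using hl)]
      simpa [pvBlocks, hl] using this

theorem pvTaEq (ls : List (List Char)) (p : Bool) :
    ((pvClean p ls).map (['\n'] ++ ·)).flatten = pvTa p ls := by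
  induction ls generalizing p with
  | nil => simp [pvClean, pvTa]
  | cons l ls ih =>
    by_cases hl : l = []
    · have ih' : ∀ p, (List.map (fun x => '\n' :: x) (pvClean p ls)).flatten = pvTa p ls := by
        intro p; simpa using ih p
      cases p <;> simp [pvClean, pvTa, hl, ih']
    · have ih' : ∀ p, (List.map (fun x => '\n' :: x) (pvClean p ls)).flatten = pvTa p ls := by
        intro p; simpa using ih p
      have he : l.isEmpty = false := by simpa using hl
      simp [pvClean, pvTa, he, hl, ih']
theorem pvJoinAppendSingleton (cur : List (List Char)) (l : List Char) (h : cur ≠ []) :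
    PySem.Chars.join ['\n'] (cur ++ [l]) = PySem.Chars.join ['\n'] cur ++ '\n' :: l := by
  induction cur with
  | nil => simp at h
  | cons c cs ih =>
    cases cs with
    | nil => simp [PySem.Chars.join_cons_cons, PySem.Chars.join_singleton]
    | cons d ds =>
      have h2 := ih (by simp)
      simp only [List.cons_append, PySem.Chars.join_cons_cons] at h2 ⊢
      simp [h2]

theorem pvTbEq (ls : List (List Char)) (cur : List (List Char)) :
    ((pvBlocks cur ls).map (fun b => ['\n', '\n'] ++ PySem.Chars.join ['\n'] b)).flatten =
      (if cur == [] then [] else ['\n', '\n'] ++ PySem.Chars.join ['\n'] cur) ++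
        pvTb (!(cur == [])) ls := by
  induction ls generalizing cur with
  | nil => by_cases h : cur = [] <;> simp [pvBlocks, pvTb, h]
  | cons l ls ih =>
    by_cases hl : l = []
    · by_cases hc : cur = [] <;> simp_all [pvBlocks, pvTb]
    · by_cases hc : cur = []
      · have h2 := ih [l]
        simp only [pvBlocks, show ((l == []) = true) = False by simp [hl], if_false, hc]
        simp [pvTb, hl, PySem.Chars.join_singleton] at h2 ⊢
        simpa using h2
      · have h2 := ih (cur ++ [l])
        rw [pvJoinAppendSingleton cur l hc] at h2
        simp only [pvBlocks, show ((l == []) = true) = False by simp [hl], if_false]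
        simp [pvTb, hl, hc, show (cur ++ [l]).isEmpty = false by simp] at h2 ⊢
        simpa using h2
-- rstrip respects equal suffixes after a common prefix.
theorem pvRstripAppendCongr (x a b : List Char) (h : PySem.Chars.rstrip a = PySem.Chars.rstrip b) :
    PySem.Chars.rstrip (x ++ a) = PySem.Chars.rstrip (x ++ b) := by
  have ha : List.dropWhile PySem.Chars.isspace a.reverse = (PySem.Chars.rstrip a).reverse := by
    simp [PySem.Chars.rstrip]
  have hb : List.dropWhile PySem.Chars.isspace b.reverse = (PySem.Chars.rstrip b).reverse := by
    simp [PySem.Chars.rstrip]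
  simp only [PySem.Chars.rstrip, List.reverse_append, List.dropWhile_append]
  rw [ha, hb, h]

theorem pvRstripCons (c : Char) (t : List Char) :
    PySem.Chars.rstrip (c :: t) =
      if (PySem.Chars.rstrip t).isEmpty then (if PySem.Chars.isspace c then [] else [c])
      else c :: PySem.Chars.rstrip t := by
  have ht : List.dropWhile PySem.Chars.isspace t.reverse = (PySem.Chars.rstrip t).reverse := by
    simp [PySem.Chars.rstrip]
  have h0 : PySem.Chars.rstrip (c :: t) =
      (List.dropWhile PySem.Chars.isspace (t.reverse ++ [c])).reverse := by
    simp [PySem.Chars.rstrip]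
  rw [h0, List.dropWhile_append, ht]
  by_cases he : (PySem.Chars.rstrip t).isEmpty <;>
    by_cases hc : PySem.Chars.isspace c <;>
      simp_all [List.dropWhile]

theorem pvStripComm (s : List Char) :
    PySem.Chars.rstrip (PySem.Chars.lstrip s) = PySem.Chars.lstrip (PySem.Chars.rstrip s) := by
  induction s with
  | nil => rfl
  | cons c t ih =>
    by_cases hc : PySem.Chars.isspace c
    · have hl : PySem.Chars.lstrip (c :: t) = PySem.Chars.lstrip t := by
        simp [PySem.Chars.lstrip, List.dropWhile, hc]
      rw [hl, ih, pvRstripCons]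
      by_cases he : (PySem.Chars.rstrip t).isEmpty
      · have h0 : PySem.Chars.rstrip t = [] := by simpa [List.isEmpty_iff] using he
        simp [hc, h0, PySem.Chars.lstrip]
      · simp [he, PySem.Chars.lstrip, hc]
    · have hl : PySem.Chars.lstrip (c :: t) = c :: t := by
        simp [PySem.Chars.lstrip, List.dropWhile, hc]
      rw [hl, pvRstripCons]
      by_cases he : (PySem.Chars.rstrip t).isEmpty <;>
        simp [he, hc, PySem.Chars.lstrip, List.dropWhile]

theorem pvStripOfRstrip (a b : List Char) (h : PySem.Chars.rstrip a = PySem.Chars.rstrip b) :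
    PySem.Chars.strip a = PySem.Chars.strip b := by
  simp only [PySem.Chars.strip, pvStripComm, h]

theorem pvStripNl (y : List Char) : PySem.Chars.strip ('\n' :: y) = PySem.Chars.strip y := by
  simp [PySem.Chars.strip, PySem.Chars.lstrip, List.dropWhile,
    show PySem.Chars.isspace '\n' = true by decide]

-- the run-alignment invariant: A after "…x" (resp. "…x\n") matches B with an open (closed) block
theorem pvLT (ls : List (List Char)) :
    PySem.Chars.rstrip (pvTa false ls) = PySem.Chars.rstrip (pvTb true ls) ∧
      PySem.Chars.rstrip ('\n' :: pvTa true ls) = PySem.Chars.rstrip (pvTb false ls) := by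
  induction ls with
  | nil =>
    refine ⟨rfl, ?_⟩
    show PySem.Chars.rstrip ['\n'] = PySem.Chars.rstrip []
    decide
  | cons l ls ih =>
    by_cases hl : l = []
    · subst hl
      refine ⟨?_, ?_⟩
      · simpa [pvTa, pvTb] using ih.2
      · simpa [pvTa, pvTb] using ih.2
    · refine ⟨?_, ?_⟩
      · have h2 := pvRstripAppendCongr (['\n'] ++ l) _ _ ih.1
        simp [pvTa, pvTb, hl]
        simpa using h2
      · have h2 := pvRstripAppendCongr ('\n' :: '\n' :: l) _ _ ih.1
        simp [pvTa, pvTb, hl]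
        simpa using h2
theorem pvL0 (ls : List (List Char)) :
    PySem.Chars.strip (pvTa false ls) = PySem.Chars.strip (pvTb false ls) := by
  cases ls with
  | nil => rfl
  | cons l ls =>
    by_cases hl : l = []
    · subst hl
      have h2 := pvStripOfRstrip _ _ (pvLT ls).2
      simp [pvTa, pvTb]
      simpa [pvStripNl] using h2
    · have h2 : PySem.Chars.strip (l ++ pvTa false ls) = PySem.Chars.strip (l ++ pvTb true ls) :=
        pvStripOfRstrip _ _ (pvRstripAppendCongr l _ _ (pvLT ls).1)
      have h3 := pvStripNl (l ++ pvTa false ls)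
      have h4 := pvStripNl (l ++ pvTb true ls)
      have h5 := pvStripNl ('\n' :: (l ++ pvTb true ls))
      simp [pvTa, pvTb, hl]
      simp at h3 h4 h5
      rw [h3, h5, h4, h2]
theorem pvJflatAux (sep x : List Char) (t : List (List Char)) :
    ((x :: t).map (sep ++ ·)).flatten = sep ++ PySem.Chars.join sep (x :: t) := by
  induction t generalizing x with
  | nil => simp [PySem.Chars.join_singleton]
  | cons y t ih =>
    rw [List.map_cons, List.flatten_cons, ih y, PySem.Chars.join_cons_cons]
    simp

theorem pvStripJoinNl (xs : List (List Char)) :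
    PySem.Chars.strip (PySem.Chars.join ['\n'] xs) =
      PySem.Chars.strip ((xs.map (['\n'] ++ ·)).flatten) := by
  cases xs with
  | nil => rfl
  | cons x t =>
    rw [pvJflatAux]
    simpa using (pvStripNl (PySem.Chars.join ['\n'] (x :: t))).symm

theorem pvStripJoinNlNl (xs : List (List Char)) :
    PySem.Chars.strip (PySem.Chars.join ['\n', '\n'] xs) =
      PySem.Chars.strip ((xs.map (['\n', '\n'] ++ ·)).flatten) := by
  cases xs with
  | nil => rfl
  | cons x t =>
    rw [pvJflatAux]
    have h1 := pvStripNl (PySem.Chars.join ['\n', '\n'] (x :: t))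
    have h2 := pvStripNl ('\n' :: PySem.Chars.join ['\n', '\n'] (x :: t))
    simp only [List.cons_append, List.nil_append] at h1 h2 ⊢
    rw [h2, h1]

theorem pvMain (ls : List (List Char)) :
    PySem.Chars.strip (PySem.Chars.join ['\n'] (ls.foldl pvStepA ([], false)).1) =
      PySem.Chars.strip (PySem.Chars.join ['\n', '\n']
        ((if (ls.foldl pvStepB ([], [])).2 == [] then (ls.foldl pvStepB ([], [])).1
          else (ls.foldl pvStepB ([], [])).1 ++ [(ls.foldl pvStepB ([], [])).2]).map
          (fun block => PySem.Chars.join ['\n'] block))) := by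
  rw [pvFoldA ls [] false, pvFoldB ls [] []]
  simp only [List.nil_append]
  rw [pvStripJoinNl, pvStripJoinNlNl, pvTaEq]
  have hm : (((pvBlocks [] ls).map (fun block => PySem.Chars.join ['\n'] block)).map
        (['\n', '\n'] ++ ·)) =
      (pvBlocks [] ls).map (fun b => ['\n', '\n'] ++ PySem.Chars.join ['\n'] b) := by
    simp [List.map_map]
  rw [hm, pvTbEq ls []]
  simpa using pvL0 ls

-- ===== VERDICT (by name: the statement is the Claim_ definition above) =====
theorem normalize_query_whitespace_py_spec : Claim_equal_normalize_query_whitespace_py := by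
  intro query _
  show normalize_query_whitespace_py query = normalize_query_whitespace_py_alt query
  unfold normalize_query_whitespace_py normalize_query_whitespace_py_alt
  exact congrArg String.ofList (pvMain _)
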